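-- pv_equiv track=rewrite | github.com/MrJujek/agh | asd/exam/Egz2B/egz2B.py | bitgame
-- ===== SOURCE A (Python) =====
-- def bitgame(T):
--     ends = []
--
--     for v in T:
--         colision = False
--
--         cp = []
--         for u in ends:
--             cp.append(u)
--
--         for u in cp:
--             if u <= v:
--                 ends.remove(u)
--                 colision = True
--
--         if not colision:
--           ends.append(v)
--
--     return len(ends)
-- ===== SOURCE B (Python) =====
-- def bitgame(T):
--     stack = []
--     for v in T:
--         popped = False
--         while stack and stack[-1] <= v:
--             stack.pop()
--             popped = True
--         if not popped:
--             stack.append(v)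
--     return len(stack)
-- ===== Notes on version B (the rewrite author's own statement) =====
-- stated objective: faster
-- what changed: Replaces A's per-element copy-and-remove-all scan of the survivor list with a monotonic stack that pops trailing elements <= v (the survivor list is always strictly decreasing, so the removed elements form a suffix).
import Mathlib
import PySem

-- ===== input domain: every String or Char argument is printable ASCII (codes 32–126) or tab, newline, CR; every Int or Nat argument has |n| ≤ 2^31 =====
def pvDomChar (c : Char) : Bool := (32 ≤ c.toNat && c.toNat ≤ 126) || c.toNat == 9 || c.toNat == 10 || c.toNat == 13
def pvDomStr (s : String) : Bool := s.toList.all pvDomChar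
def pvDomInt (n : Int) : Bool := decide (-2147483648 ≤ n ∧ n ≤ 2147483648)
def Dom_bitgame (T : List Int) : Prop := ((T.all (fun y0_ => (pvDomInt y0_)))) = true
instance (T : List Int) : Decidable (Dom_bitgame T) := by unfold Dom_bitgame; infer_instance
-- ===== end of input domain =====

-- B replaces A's per-element copy-then-remove-all scan of the survivor list by a monotonic
-- stack that pops a trailing run (the survivor list is always strictly decreasing).

-- ===== PORT A =====
def bitgame (T : List Int) : Int :=
  (T.foldl (fun ends v =>
    -- colision = False; cp = []; for u in ends: cp.append(u)
    let cp : List Int := ends.foldl (fun cp u => cp ++ [u]) []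
    -- for u in cp: if u <= v: ends.remove(u); colision = True
    -- (ends.remove(u) never raises here: every u of the copy that is ≤ v is still in ends)
    let st := cp.foldl (fun (p : List Int × Bool) u =>
        if u ≤ v then ((PySem.List.remove? p.1 u).getD p.1, true) else p) (ends, false)
    -- if not colision: ends.append(v)
    if !st.2 then st.1 ++ [v] else st.1) []).length

-- ===== PORT B =====
-- while stack and stack[-1] <= v: stack.pop(); popped = True
def popLoop (stack : List Int) (v : Int) (popped : Bool) : List Int × Bool :=
  if h : stack ≠ [] then
    if stack.getLast h ≤ v then popLoop stack.dropLast v true else (stack, popped)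
  else (stack, popped)
termination_by stack.length
decreasing_by
  simp only [List.length_dropLast]
  exact Nat.sub_lt (List.length_pos_iff.mpr h) Nat.one_pos

def bitgame_alt (T : List Int) : Int :=
  (T.foldl (fun stack v =>
    let st := popLoop stack v false
    if !st.2 then st.1 ++ [v] else st.1) []).length

-- ===== PRECONDITION & SPEC =====
def Spec_bitgame (T : List Int) (out : Int) : Prop := out = bitgame_alt T
instance (T : List Int) (out : Int) : Decidable (Spec_bitgame T out) := by unfold Spec_bitgame; infer_instance

-- ===== CLAIM (what is proved, stated in full; the proofs are below) =====
def Claim_equal_bitgame : Prop := ∀ (T : List Int), Dom_bitgame T → Spec_bitgame T (bitgame T)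

-- ===== LEMMAS AND PROOFS =====

-- the copy loop is the identity
theorem copy_eq (l : List Int) : l.foldl (fun cp u => cp ++ [u]) [] = l := by
  have : ∀ acc : List Int, l.foldl (fun cp u => cp ++ [u]) acc = acc ++ l := by
    induction l with
    | nil => intro acc; simp
    | cons x xs ih => intro acc; simp [List.foldl, ih]
  simpa using this []

theorem remove?_append (u : Int) : ∀ (pre rest : List Int), u ∉ pre →
    PySem.List.remove? (pre ++ u :: rest) u = some (pre ++ rest) := by
  intro pre
  induction pre with
  | nil => simp
  | cons p ps ih =>
    intro rest hu
    have hpu : p ≠ u := fun he => hu (by simp [he])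
    rw [List.cons_append, PySem.List.remove?_cons_of_ne _ hpu,
        ih rest (fun hm => hu (by simp [hm]))]
    simp

-- A's inner removal loop, with the already-kept prefix `pre` made explicit
theorem foldA_remove (v : Int) :
    ∀ (l pre rest : List Int) (c : Bool), (pre ++ (l ++ rest)).Nodup →
    l.foldl (fun (p : List Int × Bool) u =>
        if u ≤ v then ((PySem.List.remove? p.1 u).getD p.1, true) else p)
      (pre ++ (l ++ rest), c) =
    (pre ++ (l.filter (fun u => v < u) ++ rest), c || l.any (fun u => u ≤ v)) := by
  intro l
  induction l with
  | nil => intro pre rest c _; simp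
  | cons u l ih =>
    intro pre rest c hnd
    have hu : u ∉ pre := by
      intro hmem
      rcases List.nodup_append.mp hnd with ⟨_, _, hdisj⟩
      exact hdisj u hmem u (by simp) rfl
    simp only [List.cons_append, List.foldl_cons]
    by_cases h : u ≤ v
    · rw [if_pos h, remove?_append u pre (l ++ rest) hu, Option.getD_some]
      rw [ih pre rest true (by
        have : (pre ++ (l ++ rest)).Sublist (pre ++ (u :: (l ++ rest))) :=
          List.Sublist.append (List.Sublist.refl _) (List.sublist_cons_self _ _)
        exact List.Nodup.sublist this hnd)]
      simp [List.any_cons, not_lt.mpr h, h]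
    · have hlt : v < u := not_le.mp h
      rw [if_neg h]
      have hgoal := ih (pre ++ [u]) rest c (by simpa using hnd)
      simp only [List.append_assoc, List.singleton_append] at hgoal
      rw [hgoal]
      simp [List.any_cons, hlt, h]

-- B's pop loop on a strictly decreasing stack
theorem popLoop_eq (v : Int) :
    ∀ (s : List Int) (b : Bool), s.Pairwise (· > ·) →
    popLoop s v b = (s.filter (fun u => v < u), b || s.any (fun u => u ≤ v)) := by
  intro s
  induction s using List.reverseRecOn with
  | nil =>
    intro b _
    unfold popLoop
    simp
  | append_singleton xs x ih =>
    intro b hp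
    have hp' : xs.Pairwise (· > ·) := List.Pairwise.sublist (List.sublist_append_left xs [x]) hp
    have hne : xs ++ [x] ≠ [] := by simp
    by_cases h : x ≤ v
    · unfold popLoop
      rw [dif_pos hne, show (xs ++ [x]).getLast hne = x from List.getLast_concat,
          if_pos h, List.dropLast_concat, ih true hp']
      simp [List.filter_append, List.any_append, not_lt.mpr h, h]
    · have hgt : v < x := not_le.mp h
      have hall : ∀ u ∈ xs ++ [x], v < u := by
        intro u hu
        rcases List.mem_append.mp hu with hu | hu
        · have hux : u > x := (List.pairwise_append.mp hp).2.2 u hu x (by simp)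
          exact lt_trans hgt hux
        · simp at hu; omega
      unfold popLoop
      rw [dif_pos hne, show (xs ++ [x]).getLast hne = x from List.getLast_concat, if_neg h]
      have hfilter : (xs ++ [x]).filter (fun u => v < u) = xs ++ [x] :=
        List.filter_eq_self.mpr (fun u hu => by simpa using hall u hu)
      have hany : (xs ++ [x]).any (fun u => u ≤ v) = false := by
        simp only [List.any_eq_false]
        intro u hu
        simpa using not_le.mpr (hall u hu)
      rw [hfilter, hany, Bool.or_false]

-- one step of A equals one step of B on a strictly decreasing state, preserving decreasingness
theorem step_eq (e : List Int) (v : Int) (hp : e.Pairwise (· > ·)) :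
    (let cp : List Int := e.foldl (fun cp u => cp ++ [u]) []
     let st := cp.foldl (fun (p : List Int × Bool) u =>
        if u ≤ v then ((PySem.List.remove? p.1 u).getD p.1, true) else p) (e, false)
     if !st.2 then st.1 ++ [v] else st.1)
    = (let st := popLoop e v false
       if !st.2 then st.1 ++ [v] else st.1)
    ∧ ((let st := popLoop e v false
       if !st.2 then st.1 ++ [v] else st.1) : List Int).Pairwise (· > ·) := by
  have hnd : e.Nodup := hp.imp (fun h => ne_of_gt h)
  have hA := foldA_remove v e [] [] false (by simpa using hnd)
  simp only [List.nil_append, List.append_nil] at hA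
  have hB := popLoop_eq v e false hp
  constructor
  · simp only [copy_eq, hA, hB]
  · simp only [hB]
    cases hany : e.any (fun u => u ≤ v) with
    | true =>
      simp only [Bool.or_true, Bool.not_true]
      rw [if_neg (by simp)]
      exact List.Pairwise.sublist List.filter_sublist hp
    | false =>
      have hall : ∀ u ∈ e, v < u := by
        intro u hu
        have := List.any_eq_false.mp hany u hu
        simpa using not_le.mp (by simpa using this)
      have hfe : e.filter (fun u => v < u) = e :=
        List.filter_eq_self.mpr (fun u hu => by simpa using hall u hu)
      simp only [Bool.or_false, Bool.not_false, if_true, hfe]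
      rw [List.pairwise_append]
      exact ⟨hp, by simp, fun a ha b hb => by simp at hb; subst hb; exact hall a ha⟩

-- ===== VERDICT (by name: the statement is the Claim_ definition above) =====
theorem bitgame_spec : Claim_equal_bitgame := by
  intro T _
  unfold Spec_bitgame bitgame bitgame_alt
  suffices h : ∀ (T : List Int) (e : List Int), e.Pairwise (· > ·) →
      T.foldl (fun ends v =>
        let cp : List Int := ends.foldl (fun cp u => cp ++ [u]) []
        let st := cp.foldl (fun (p : List Int × Bool) u =>
            if u ≤ v then ((PySem.List.remove? p.1 u).getD p.1, true) else p) (ends, false)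
        if !st.2 then st.1 ++ [v] else st.1) e
      = T.foldl (fun stack v =>
        let st := popLoop stack v false
        if !st.2 then st.1 ++ [v] else st.1) e by
    rw [h T [] (by simp)]
  intro T
  induction T with
  | nil => intro e _; rfl
  | cons v T ih =>
    intro e hp
    simp only [List.foldl_cons]
    obtain ⟨heq, hp'⟩ := step_eq e v hp
    rw [heq]
    exact ih _ hp'
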